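-- pv_equiv track=rewrite | github.com/moreiarty/advent-of-code-2025 | src/2-gift-shop-part-2.py | create_processable_sub_ranges
-- ===== SOURCE A (Python) =====
-- def create_processable_sub_ranges(id_range: tuple[str, str]) -> list[tuple[str, str]]:
--     start_str, end_str = id_range
--
--     start_str_len = len(start_str)
--     end_str_len = len(end_str)
--
--     sub_ranges: list[tuple[str, str]] = []
--
--     if start_str_len < end_str_len:
--         sub_ranges.append([start_str, "9" * start_str_len])
--         sub_ranges.extend(
--             create_processable_sub_ranges(["1" + "0" * start_str_len, end_str])
--         )
--     elif start_str_len > end_str_len: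
--         raise Exception("Start range was bigger than end range somehow?")
--     else:
--         # when both start of range and end of range have same no of digits.
--         sub_ranges.append([start_str, end_str])
--
--     return sub_ranges
-- ===== SOURCE B (Python) =====
-- def create_processable_sub_ranges(id_range: tuple[str, str]) -> list[tuple[str, str]]:
--     start_str, end_str = id_range
--     if len(start_str) > len(end_str):
--         raise Exception("Start range was bigger than end range somehow?")
--     sub_ranges = []
--     cur_start = start_str
--     for L in range(len(start_str), len(end_str)):
--         sub_ranges.append([cur_start, "9" * L])
--         cur_start = "1" + "0" * L
--     sub_ranges.append([cur_start, end_str])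
--     return sub_ranges
-- ===== Notes on version B (the rewrite author's own statement) =====
-- stated objective: simpler
-- what changed: Replaced A's recursion (rebuilding a pair and re-entering the function per digit length) by a single iterative loop over the digit lengths that accumulates the sub-ranges directly.
import Mathlib
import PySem

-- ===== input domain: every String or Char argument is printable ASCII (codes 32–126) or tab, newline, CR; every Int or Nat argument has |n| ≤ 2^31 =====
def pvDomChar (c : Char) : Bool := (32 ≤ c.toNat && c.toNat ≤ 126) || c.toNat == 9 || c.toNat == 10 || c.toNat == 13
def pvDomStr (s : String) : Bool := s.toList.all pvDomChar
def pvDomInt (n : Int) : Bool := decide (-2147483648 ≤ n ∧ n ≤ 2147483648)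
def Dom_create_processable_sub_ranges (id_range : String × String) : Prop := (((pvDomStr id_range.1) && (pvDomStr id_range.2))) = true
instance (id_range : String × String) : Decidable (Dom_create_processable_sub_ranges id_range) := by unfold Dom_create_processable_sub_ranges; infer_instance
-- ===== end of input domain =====

-- B replaces A's per-digit-length recursion by a single iterative loop accumulating the sub-ranges (objective: simpler).


-- ===== PORT A =====
-- A recurses: emit [start, "9"*len(start)] then recurse on ("1"+"0"*len(start), end).
def create_processable_sub_ranges (id_range : String × String) : List (String × String) :=
  if id_range.1.toList.length < id_range.2.toList.length then
    (id_range.1, String.ofList (List.replicate id_range.1.toList.length '9')) ::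
      create_processable_sub_ranges
        (String.ofList ('1' :: List.replicate id_range.1.toList.length '0'), id_range.2)
  else if id_range.2.toList.length < id_range.1.toList.length then
    []  -- Python raises Exception("Start range was bigger than end range somehow?"); excluded by Pre_
  else
    [(id_range.1, id_range.2)]
termination_by id_range.2.toList.length - id_range.1.toList.length
decreasing_by simp only [String.toList_ofList, List.length_cons, List.length_replicate]; omega

-- ===== PORT B =====
-- B's loop body: append [cur_start, "9"*L] and set cur_start = "1"+"0"*L.
def pvStep (st : String × List (String × String)) (L : Nat) : String × List (String × String) :=
  (String.ofList ('1' :: List.replicate L '0'),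
   st.2 ++ [(st.1, String.ofList (List.replicate L '9'))])

def create_processable_sub_ranges_alt (id_range : String × String) : List (String × String) :=
  let ls := id_range.1.toList.length
  let le := id_range.2.toList.length
  -- if ls > le: Python raises the same Exception (excluded by Pre_)
  if le < ls then [] else
  let fin := (List.range' ls (le - ls)).foldl pvStep (id_range.1, [])
  fin.2 ++ [(fin.1, id_range.2)]

-- ===== PRECONDITION & SPEC =====
-- Pre_ excludes exactly the inputs where A raises: start longer than end.
def Pre_create_processable_sub_ranges (id_range : String × String) : Prop :=
  id_range.1.toList.length ≤ id_range.2.toList.length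
instance (id_range : String × String) : Decidable (Pre_create_processable_sub_ranges id_range) := by
  unfold Pre_create_processable_sub_ranges; infer_instance

def pvWitness_create_processable_sub_ranges : (String × String) := ("5", "1234")

def Spec_create_processable_sub_ranges (id_range : String × String) (out : List (String × String)) : Prop := out = create_processable_sub_ranges_alt id_range
instance (id_range : String × String) (out : List (String × String)) : Decidable (Spec_create_processable_sub_ranges id_range out) := by unfold Spec_create_processable_sub_ranges; infer_instance

-- ===== CLAIM (what is proved, stated in full; the proofs are below) =====
def Claim_equal_create_processable_sub_ranges : Prop := ∀ (id_range : String × String), Dom_create_processable_sub_ranges id_range → Pre_create_processable_sub_ranges id_range → Spec_create_processable_sub_ranges id_range (create_processable_sub_ranges id_range)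

-- ===== LEMMAS AND PROOFS =====
lemma pv_loop (n : Nat) : ∀ (cur e : String) (acc : List (String × String)),
    cur.toList.length + n = e.toList.length →
    (let fin := (List.range' cur.toList.length n).foldl pvStep (cur, acc)
     fin.2 ++ [(fin.1, e)]) = acc ++ create_processable_sub_ranges (cur, e) := by
  induction n with
  | zero =>
    intro cur e acc h
    unfold create_processable_sub_ranges
    simp at h
    simp [h]
  | succ n ih =>
    intro cur e acc h
    unfold create_processable_sub_ranges
    have hlt : cur.toList.length < e.toList.length := by omega
    simp only [hlt, if_pos]
    rw [List.range'_succ, List.foldl_cons]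
    have hih := ih (String.ofList ('1' :: List.replicate cur.toList.length '0')) e
      (acc ++ [(cur, String.ofList (List.replicate cur.toList.length '9'))]) (by simp only [String.toList_ofList, List.length_cons, List.length_replicate]; omega)
    simp only [String.toList_ofList, List.length_cons, List.length_replicate] at hih ⊢
    rw [pvStep] at *
    simp only at hih ⊢
    rw [hih]
    simp

-- ===== VERDICT (by name: the statement is the Claim_ definition above) =====
theorem create_processable_sub_ranges_spec : Claim_equal_create_processable_sub_ranges := by
  intro ⟨s, e⟩ _ hpre
  unfold Spec_create_processable_sub_ranges create_processable_sub_ranges_alt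
  have hle : ¬ e.toList.length < s.toList.length := by
    exact not_lt.mpr hpre
  simp only [hle, if_neg, not_false_iff]
  have := pv_loop (e.toList.length - s.toList.length) s e [] (by
    unfold Pre_create_processable_sub_ranges at hpre; omega)
  simpa using this.symm
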